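-- pv_equiv track=rewrite | github.com/JinFuLee/51Talk-Referral | backend/api/access_control.py | _get_user_visible_pages
-- ===== SOURCE A (Python) =====
-- def _page_matches(page_path: str, pattern: str) -> bool:
--     """判断页面路径是否匹配权限模式（支持 * 通配符和 /* 后缀）。"""
--     if pattern == "*":
--         return True
--     if pattern.endswith("/*"):
--         prefix = pattern[:-2]
--         return page_path == prefix or page_path.startswith(prefix + "/")
--     return page_path == pattern
--
-- def _get_user_visible_pages(
--     role_pages: list[str], page_registry: list[dict]
-- ) -> list[dict]:
--     """根据角色页面列表，从注册表过滤出可见页面。"""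
--     visible: list[dict] = []
--     for page in page_registry:
--         path = page.get("path", "")
--         for pattern in role_pages:
--             if _page_matches(path, pattern):
--                 visible.append(page)
--                 break
--     return visible
-- ===== SOURCE B (Python) =====
-- def _get_user_visible_pages(
--     role_pages: list[str], page_registry: list[dict]
-- ) -> list[dict]:
--     """One pass: precompute star flag, exact-match set and prefix list, then filter."""
--     star = "*" in role_pages
--     prefixes = [p[:-2] for p in role_pages if p.endswith("/*")]
--     exacts = {p for p in role_pages if p != "*" and not p.endswith("/*")}
--
--     def visible(path: str) -> bool:
--         return (
--             star
--             or path in exacts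
--             or any(path == pfx or path.startswith(pfx + "/") for pfx in prefixes)
--         )
--
--     return [page for page in page_registry if visible(page.get("path", ""))]
-- ===== Notes on version B (the rewrite author's own statement) =====
-- stated objective: faster
-- what changed: A re-scans all role patterns (re-parsing each pattern's '*'/'/*' shape) for every registry page; B pre-classifies the patterns once into a star flag, a set of exact paths and a list of stripped prefixes, then filters the registry in one pass with an O(1) set lookup plus a prefix scan only over the '/*' patterns.
import Mathlib
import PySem

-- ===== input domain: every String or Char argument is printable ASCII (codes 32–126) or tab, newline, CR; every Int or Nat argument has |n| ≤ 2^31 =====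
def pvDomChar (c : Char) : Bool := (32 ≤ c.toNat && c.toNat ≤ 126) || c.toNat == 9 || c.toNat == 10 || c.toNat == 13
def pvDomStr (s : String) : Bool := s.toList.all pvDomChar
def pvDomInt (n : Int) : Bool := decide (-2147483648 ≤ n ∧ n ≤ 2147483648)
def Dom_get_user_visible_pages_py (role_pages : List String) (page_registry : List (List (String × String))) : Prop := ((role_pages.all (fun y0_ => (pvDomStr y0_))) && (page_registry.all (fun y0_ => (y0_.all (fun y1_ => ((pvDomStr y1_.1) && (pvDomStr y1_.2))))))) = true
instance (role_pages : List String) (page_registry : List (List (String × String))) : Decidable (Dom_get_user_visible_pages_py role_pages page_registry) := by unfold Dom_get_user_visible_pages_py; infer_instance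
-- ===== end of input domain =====

-- B replaces A's nested pattern scan by a precomputed star flag, exact-match set and prefix list, filtering the registry in one pass.

-- shared helper: page.get("path", "") on the association-list encoding of the dict
def pvGetPath (page : List (String × String)) : String :=
  PySem.Dict.getD (PySem.Dict.ofList page) "path" ""

-- ===== PORT A =====
def pvPageMatches (page_path pattern : String) : Bool :=
  if pattern == "*" then true
  else if PySem.Str.endswith pattern "/*" then
    let prefixS := PySem.Str.slice pattern none (some (-2))
    page_path == prefixS || PySem.Str.startswith page_path (prefixS ++ "/")
  else page_path == pattern

-- inner 'for pattern in role_pages: … break' loop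
def pvFirstMatch (path : String) : List String → Bool
  | [] => false
  | p :: rest => if pvPageMatches path p then true else pvFirstMatch path rest

def get_user_visible_pages_py (role_pages : List String) (page_registry : List (List (String × String))) : List (List (String × String)) :=
  page_registry.foldl
    (fun visible page =>
      if pvFirstMatch (pvGetPath page) role_pages then visible ++ [page] else visible)
    []

-- ===== PORT B =====
def pvStar (role_pages : List String) : Bool := role_pages.any (· == "*")

def pvPrefixes (role_pages : List String) : List String :=
  (role_pages.filter (fun p => PySem.Str.endswith p "/*")).map
    (fun p => PySem.Str.slice p none (some (-2)))

def pvExacts (role_pages : List String) : PySem.Set String :=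
  PySem.Set.ofList
    (role_pages.filter (fun p => !(p == "*") && !(PySem.Str.endswith p "/*")))

def pvVisible (star : Bool) (exacts : PySem.Set String) (prefixes : List String) (path : String) : Bool :=
  star || PySem.Set.contains exacts path ||
    prefixes.any (fun pfx => path == pfx || PySem.Str.startswith path (pfx ++ "/"))

def get_user_visible_pages_py_alt (role_pages : List String) (page_registry : List (List (String × String))) : List (List (String × String)) :=
  let star := pvStar role_pages
  let prefixes := pvPrefixes role_pages
  let exacts := pvExacts role_pages
  page_registry.filter (fun page => pvVisible star exacts prefixes (pvGetPath page))

-- ===== PRECONDITION & SPEC =====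
def Spec_get_user_visible_pages_py (role_pages : List String) (page_registry : List (List (String × String))) (out : List (List (String × String))) : Prop := out = get_user_visible_pages_py_alt role_pages page_registry
instance (role_pages : List String) (page_registry : List (List (String × String))) (out : List (List (String × String))) : Decidable (Spec_get_user_visible_pages_py role_pages page_registry out) := by unfold Spec_get_user_visible_pages_py; infer_instance

-- ===== CLAIM (what is proved, stated in full; the proofs are below) =====
def Claim_equal_get_user_visible_pages_py : Prop := ∀ (role_pages : List String) (page_registry : List (List (String × String))), Dom_get_user_visible_pages_py role_pages page_registry → Spec_get_user_visible_pages_py role_pages page_registry (get_user_visible_pages_py role_pages page_registry)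

-- ===== LEMMAS AND PROOFS =====

lemma contains_ofList_eq (l : List String) (x : String) :
    PySem.Set.contains (PySem.Set.ofList l) x = l.contains x := by
  by_cases h : x ∈ l
  · simp [PySem.Set.contains_eq_listContains, PySem.Set.mem_ofList, h]
  · simp [PySem.Set.contains_eq_listContains, PySem.Set.mem_ofList, h]

-- B's precomputed membership test agrees with A's first-match inner loop
lemma visible_eq (path : String) (rp : List String) :
    pvVisible (pvStar rp) (pvExacts rp) (pvPrefixes rp) path = pvFirstMatch path rp := by
  induction rp with
  | nil => simp [pvVisible, pvStar, pvExacts, pvPrefixes, pvFirstMatch, PySem.Set.ofList]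
  | cons p rest ih =>
    by_cases hstar : p = "*"
    · subst hstar
      simp [pvVisible, pvStar, pvExacts, pvPrefixes, pvFirstMatch, pvPageMatches]
    · have hpb : (p == "*") = false := beq_eq_false_iff_ne.mpr hstar
      by_cases hend : PySem.Str.endswith p "/*" = true
      · simp only [pvVisible, pvStar, pvExacts, pvPrefixes, pvFirstMatch, pvPageMatches,
          List.any_cons, List.filter_cons, contains_ofList_eq] at *
        simp only [hend, hpb, if_true, Bool.not_true, Bool.and_false,
          List.map_cons, List.any_cons]
        cases hm : (path == PySem.Str.slice p none (some (-2)) ||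
            PySem.Str.startswith path (PySem.Str.slice p none (some (-2)) ++ "/"))
        · simp [← ih]
        · simp
      · simp only [pvVisible, pvStar, pvExacts, pvPrefixes, pvFirstMatch, pvPageMatches,
          List.any_cons, List.filter_cons, contains_ofList_eq] at *
        simp only [hend, hpb, Bool.not_false]
        by_cases hm : path = p
        · subst hm; simp [hpb]
        · simp [hm, ← ih]

-- ===== VERDICT (by name: the statement is the Claim_ definition above) =====
theorem get_user_visible_pages_py_spec : Claim_equal_get_user_visible_pages_py := by
  intro role_pages page_registry _
  unfold Spec_get_user_visible_pages_py get_user_visible_pages_py get_user_visible_pages_py_alt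
  rw [PySem.List.foldl_append_if_eq_filter]
  simp [visible_eq]
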